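-- pv_equiv track=rewrite | github.com/ReedOei/Pecan | pecan/tools/convert_hoa.py | adjust_base
-- ===== SOURCE A (Python) =====
-- def adjust_base(line):
--         bases = []
--         base = 1
--         for c in line:
--             if c == ',':
--                 base += 1
--             elif c == '}':
--                 bases.append(base)
--             elif c == '{':
--                 base = 1
--         return bases
-- ===== SOURCE B (Python) =====
-- def adjust_base(line):
--     return [line.count(',', line.rfind('{', 0, i) + 1, i) + 1
--             for i in range(len(line)) if line[i] == '}']
-- ===== Notes on version B (the rewrite author's own statement) =====
-- stated objective: alternative
-- what changed: B drops A's running state entirely: it lists the positions of '}' and for each one answers a positional query, 1 plus the number of ',' between the last '{' before it (str.rfind) and that position (str.count).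
import Mathlib
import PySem

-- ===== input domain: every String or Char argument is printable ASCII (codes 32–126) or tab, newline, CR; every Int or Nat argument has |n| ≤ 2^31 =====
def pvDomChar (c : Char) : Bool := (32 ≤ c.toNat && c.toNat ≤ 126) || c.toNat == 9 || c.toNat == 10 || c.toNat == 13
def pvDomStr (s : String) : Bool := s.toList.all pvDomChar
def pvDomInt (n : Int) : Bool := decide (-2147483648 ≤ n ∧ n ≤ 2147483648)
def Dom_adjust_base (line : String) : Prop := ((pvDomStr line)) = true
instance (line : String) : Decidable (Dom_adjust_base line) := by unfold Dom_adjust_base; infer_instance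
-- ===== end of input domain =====

-- B replaces A's single stateful scan by independent positional queries: for each '}' index,
-- 1 + the number of ',' between the last '{' before it and that index (objective: alternative;
-- not faster — the per-'}' queries rescan the segment).

-- ===== PORT A =====
-- A's loop body: ',' increments base, '}' appends base, '{' resets base to 1.
def adjAStep (st : List Int × Int) (c : Char) : List Int × Int :=
  if c = ',' then (st.1, st.2 + 1)
  else if c = '}' then (st.1 ++ [st.2], st.2)
  else if c = '{' then (st.1, 1)
  else st

def adjust_base (line : String) : List Int :=
  (line.toList.foldl adjAStep ([], 1)).1

-- ===== PORT B =====
-- hand port of line.rfind('{', 0, i) applied to the prefix: index of the last '{' in cs, else -1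
-- (exact for a one-character needle).
def rfindBrace : List Char → Int
  | [] => -1
  | c :: rest =>
    let r := rfindBrace rest
    if 0 ≤ r then r + 1 else if c = '{' then 0 else -1

-- B: [line.count(',', line.rfind('{',0,i)+1, i) + 1 for i in range(len(line)) if line[i]=='}']
def adjust_base_alt (line : String) : List Int :=
  let cs := line.toList
  ((List.range cs.length).filter (fun i => cs.getD i ' ' = '}')).map
    (fun i => (((cs.take i).drop ((rfindBrace (cs.take i) + 1).toNat)).count ',' : Int) + 1)

-- ===== PRECONDITION & SPEC =====
def Spec_adjust_base (line : String) (out : List Int) : Prop := out = adjust_base_alt line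
instance (line : String) (out : List Int) : Decidable (Spec_adjust_base line out) := by unfold Spec_adjust_base; infer_instance

-- ===== CLAIM (what is proved, stated in full; the proofs are below) =====
def Claim_equal_adjust_base : Prop := ∀ (line : String), Dom_adjust_base line → Spec_adjust_base line (adjust_base line)

-- ===== LEMMAS AND PROOFS =====

-- B's value list, over a char list (what adjust_base_alt computes)
def bVal (cs : List Char) : List Int :=
  ((List.range cs.length).filter (fun i => cs.getD i ' ' = '}')).map
    (fun i => (((cs.take i).drop ((rfindBrace (cs.take i) + 1).toNat)).count ',' : Int) + 1)

-- B's per-'}' value on the prefix before the '}'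
def bBase (p : List Char) : Int :=
  ((p.drop ((rfindBrace p + 1).toNat)).count ',' : Int) + 1

theorem rfindBrace_lt (p : List Char) : rfindBrace p < p.length := by
  induction p with
  | nil => simp [rfindBrace]
  | cons c rest ih =>
    simp only [rfindBrace, List.length_cons]
    split_ifs <;> omega

theorem rfindBrace_append_brace (p : List Char) : rfindBrace (p ++ ['{']) = p.length := by
  induction p with
  | nil => simp [rfindBrace]
  | cons c rest ih =>
    have h := rfindBrace_lt (rest ++ ['{'])
    simp only [List.cons_append, rfindBrace, ih, List.length_cons]
    rw [if_pos (by omega)]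
    push_cast
    ring

theorem rfindBrace_append_other (p : List Char) (c : Char) (hc : c ≠ '{') :
    rfindBrace (p ++ [c]) = rfindBrace p := by
  induction p with
  | nil => simp [rfindBrace, hc]
  | cons a rest ih => simp only [List.cons_append, rfindBrace, ih]

theorem bBase_append_brace (p : List Char) : bBase (p ++ ['{']) = 1 := by
  simp [bBase, rfindBrace_append_brace]

theorem bBase_append_other (p : List Char) (c : Char) (hc : c ≠ '{') :
    bBase (p ++ [c]) = bBase p + (if c = ',' then 1 else 0) := by
  have hlt := rfindBrace_lt p
  have hge : -1 ≤ rfindBrace p := by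
    induction p with
    | nil => simp [rfindBrace]
    | cons a rest ih =>
      simp only [rfindBrace]
      split_ifs <;> omega
  have hle : (rfindBrace p + 1).toNat ≤ p.length := by omega
  simp only [bBase, rfindBrace_append_other p c hc, List.drop_append_of_le_length hle,
    List.count_append]
  by_cases h : c = ',' <;> simp [h]

theorem bVal_append (p : List Char) (c : Char) :
    bVal (p ++ [c]) = bVal p ++ (if c = '}' then [bBase p] else []) := by
  simp only [bVal, List.length_append, List.length_cons, List.length_nil,
    List.range_succ, List.filter_append, List.map_append]
  congr 1
  · -- the first |p| indices behave as on p
    have hf : ∀ i ∈ List.range p.length,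
        (decide ((p ++ [c]).getD i ' ' = '}')) = (decide (p.getD i ' ' = '}')) := by
      intro i hi
      rw [List.mem_range] at hi
      simp [List.getD, List.getElem?_append_left hi]
    rw [List.filter_congr hf]
    apply List.map_congr_left
    intro i hi
    have hi' : i < p.length := by
      have := List.mem_range.mp (List.mem_of_mem_filter hi)
      omega
    rw [List.take_append_of_le_length (le_of_lt hi')]
  · -- the new index p.length
    by_cases h : c = '}'
    · simp only [List.filter_cons, List.filter_nil, h]
      simp [bBase, List.take_append_of_le_length (le_refl p.length), List.take_length]
    · simp [h]

-- the main invariant: A's fold state over p is (bVal p, bBase p)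
theorem adjMain (p : List Char) : p.foldl adjAStep ([], 1) = (bVal p, bBase p) := by
  induction p using List.reverseRecOn with
  | nil => simp [bVal, bBase, rfindBrace]
  | append_singleton p c ih =>
    rw [List.foldl_append, ih, List.foldl_cons, List.foldl_nil, bVal_append]
    by_cases h1 : c = ','
    · subst h1
      simp [adjAStep, bBase_append_other p ',' (by decide)]
    · by_cases h2 : c = '}'
      · subst h2
        simp [adjAStep, bBase_append_other p '}' (by decide)]
      · by_cases h3 : c = '{'
        · subst h3
          simp [adjAStep, bBase_append_brace]
        · simp [adjAStep, h1, h2, h3, bBase_append_other p c h3]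

-- ===== VERDICT (by name: the statement is the Claim_ definition above) =====
theorem adjust_base_spec : Claim_equal_adjust_base := by
  intro line _
  unfold Spec_adjust_base adjust_base adjust_base_alt
  rw [adjMain]
  simp [bVal]
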